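-- pv_equiv track=rewrite | github.com/prasanna31/Data-structures-and-Algorithms | Arrays.py | longest_substring_no_repeating_vowels
-- ===== SOURCE A (Python) =====
-- def longest_substring_no_repeating_vowels(s):
--     # Returns length of longest substring without repeating vowels
--     vowels = set('aeiou')
--     last_seen = {}
--     left = max_len = 0
--     for right, char in enumerate(s):
--         if char in vowels:
--             if char in last_seen and last_seen[char] >= left:
--                 left = last_seen[char] + 1
--             last_seen[char] = right
--         max_len = max(max_len, right - left + 1)
--     return max_len
-- ===== SOURCE B (Python) =====
-- def longest_substring_no_repeating_vowels(s):
--     # Sliding window: keep the set of vowels currently inside the window and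
--     # shrink the left edge one step at a time instead of jumping via a last-index dict.
--     vowels = set('aeiou')
--     seen = set()
--     left = max_len = 0
--     for right, char in enumerate(s):
--         if char in vowels:
--             while char in seen:
--                 if s[left] in vowels:
--                     seen.discard(s[left])
--                 left += 1
--             seen.add(char)
--         max_len = max(max_len, right - left + 1)
--     return max_len
-- ===== Notes on version B (the rewrite author's own statement) =====
-- stated objective: alternative
-- what changed: Replaces the last-seen-index dict and the one-shot left jump by a current-window vowel set with an incremental while-loop that shrinks the left edge one character at a time, discarding vowels as they leave the window.
import Mathlib
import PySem

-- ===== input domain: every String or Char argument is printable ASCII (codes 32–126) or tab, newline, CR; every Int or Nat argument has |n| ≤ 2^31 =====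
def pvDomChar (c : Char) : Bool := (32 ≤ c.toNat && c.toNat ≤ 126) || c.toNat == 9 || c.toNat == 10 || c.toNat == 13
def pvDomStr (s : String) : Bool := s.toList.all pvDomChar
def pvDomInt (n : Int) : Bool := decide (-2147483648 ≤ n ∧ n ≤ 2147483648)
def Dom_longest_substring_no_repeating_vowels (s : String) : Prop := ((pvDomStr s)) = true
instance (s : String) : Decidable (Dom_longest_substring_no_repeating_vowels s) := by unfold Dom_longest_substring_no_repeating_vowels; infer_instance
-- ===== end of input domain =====

-- B replaces A's last-seen-index dict (with its one-shot left jump) by a current-window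
-- vowel set shrunk one character at a time by an inner while loop (objective: alternative).

-- ===== PORT A =====
-- vowels = set('aeiou')  (shared constant of both Pythons)
def pvVowels : PySem.Set Char := PySem.Set.ofList "aeiou".toList

def pvAStep (st : PySem.Dict Char Int × Int × Int) (p : Int × Char) :
    PySem.Dict Char Int × Int × Int :=
  match st, p with
  | (last_seen, left, max_len), (right, char) =>
    if PySem.Set.contains pvVowels char then
      -- if char in last_seen and last_seen[char] >= left: left = last_seen[char] + 1
      let left' := match last_seen.get? char with
        | some j => if left ≤ j then j + 1 else left
        | none => left
      (last_seen.insert char right, left', max max_len (right - left' + 1))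
    else (last_seen, left, max max_len (right - left + 1))

def longest_substring_no_repeating_vowels (s : String) : Int :=
  ((PySem.List.enumerate s.toList 0).foldl pvAStep (PySem.Dict.empty, 0, 0)).2.2

-- ===== PORT B =====
-- the inner 'while char in seen' loop; fuel = len(s) bounds its iterations (it advances
-- left, which never passes the window's occurrence of char); pyGet? none = Python IndexError,
-- unreachable because char∈seen guarantees an occurrence at index ≥ left
def pvShrink (cs : List Char) (char : Char) :
    Nat → PySem.Set Char → Int → PySem.Set Char × Int
  | 0, seen, left => (seen, left)
  | fuel + 1, seen, left =>
    if PySem.Set.contains seen char then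
      match PySem.List.pyGet? cs left with
      | some c2 =>
          pvShrink cs char fuel
            (if PySem.Set.contains pvVowels c2 then PySem.Set.discard seen c2 else seen)
            (left + 1)
      | none => (seen, left)
    else (seen, left)

def pvBStep (cs : List Char) (st : PySem.Set Char × Int × Int) (p : Int × Char) :
    PySem.Set Char × Int × Int :=
  match st, p with
  | (seen, left, max_len), (right, char) =>
    if PySem.Set.contains pvVowels char then
      let r := pvShrink cs char cs.length seen left
      (PySem.Set.add r.1 char, r.2, max max_len (right - r.2 + 1))
    else (seen, left, max max_len (right - left + 1))

def longest_substring_no_repeating_vowels_alt (s : String) : Int :=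
  ((PySem.List.enumerate s.toList 0).foldl (pvBStep s.toList) (PySem.Set.empty, 0, 0)).2.2

-- ===== PRECONDITION & SPEC =====
def Spec_longest_substring_no_repeating_vowels (s : String) (out : Int) : Prop := out = longest_substring_no_repeating_vowels_alt s
instance (s : String) (out : Int) : Decidable (Spec_longest_substring_no_repeating_vowels s out) := by unfold Spec_longest_substring_no_repeating_vowels; infer_instance

-- ===== CLAIM (what is proved, stated in full; the proofs are below) =====
def Claim_equal_longest_substring_no_repeating_vowels : Prop := ∀ (s : String), Dom_longest_substring_no_repeating_vowels s → Spec_longest_substring_no_repeating_vowels s (longest_substring_no_repeating_vowels s)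

-- ===== LEMMAS AND PROOFS =====

-- no occurrence of c in cs[a:b]
def pvNoOcc (cs : List Char) (c : Char) (a b : Nat) : Prop :=
  ∀ k, a ≤ k → k < b → cs[k]? ≠ some c

-- seen = the vowels occurring in the current window cs[L:i]
def pvSeenInv (cs : List Char) (seen : PySem.Set Char) (L i : Nat) : Prop :=
  ∀ x, x ∈ seen ↔ (x ∈ pvVowels ∧ ∃ k, L ≤ k ∧ k < i ∧ cs[k]? = some x)

-- each vowel occurs at most once in the window cs[L:i]
def pvDistinctWin (cs : List Char) (L i : Nat) : Prop :=
  ∀ v k1 k2, v ∈ pvVowels → L ≤ k1 → k1 < k2 → k2 < i → cs[k1]? = some v → cs[k2]? ≠ some v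

-- last_seen maps each vowel to the index of its last occurrence before i
def pvDictInv (cs : List Char) (d : PySem.Dict Char Int) (i : Nat) : Prop :=
  ∀ c, c ∈ pvVowels →
    (d.get? c = none → pvNoOcc cs c 0 i) ∧
    (∀ x, d.get? c = some x →
      ∃ j : Nat, x = (j : Int) ∧ j < i ∧ cs[j]? = some c ∧ pvNoOcc cs c (j + 1) i)

theorem pvShrink_no (cs : List Char) (c : Char) (fuel : Nat) (seen : PySem.Set Char)
    (left : Int) (h : c ∉ seen) : pvShrink cs c fuel seen left = (seen, left) := by
  cases fuel with
  | zero => rfl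
  | succ n =>
    simp only [pvShrink]
    rw [if_neg]
    simp [h]

-- appending the (vowel) character cs[i] to the window keeps the seen-set invariant
theorem pvSeenInv_step (cs : List Char) (seen : PySem.Set Char) (L i : Nat) (c : Char)
    (hLi : L ≤ i) (hc : cs[i]? = some c) (hcv : c ∈ pvVowels)
    (hs : pvSeenInv cs seen L i) : pvSeenInv cs (PySem.Set.add seen c) L (i + 1) := by
  intro x
  rw [PySem.Set.mem_add]
  constructor
  · rintro (hx | rfl)
    · obtain ⟨hxv, k, h1, h2, h3⟩ := (hs x).1 hx
      exact ⟨hxv, k, h1, by omega, h3⟩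
    · exact ⟨hcv, i, hLi, by omega, hc⟩
  · rintro ⟨hxv, k, h1, h2, h3⟩
    rcases Nat.lt_or_ge k i with h' | h'
    · exact Or.inl ((hs x).2 ⟨hxv, k, h1, h', h3⟩)
    · have : k = i := by omega
      rw [this, hc] at h3
      exact Or.inr (Option.some.inj h3).symm

-- appending cs[i] keeps window distinctness when cs[i] has no occurrence inside the window
theorem pvDistinctWin_step (cs : List Char) (L i : Nat) (c : Char)
    (hc : cs[i]? = some c) (hw : pvDistinctWin cs L i)
    (hno : ∀ k, L ≤ k → k < i → cs[k]? ≠ some c) : pvDistinctWin cs L (i + 1) := by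
  intro v k1 k2 hv h1 h2 h3 h4
  rcases Nat.lt_or_ge k2 i with h' | h'
  · exact hw v k1 k2 hv h1 h2 h' h4
  · have hk2 : k2 = i := by omega
    rw [hk2, hc]
    intro h5
    have : c = v := Option.some.inj h5
    subst this
    exact hno k1 h1 (by omega) h4

-- inserting last_seen[c] = i keeps the last-occurrence invariant
theorem pvDictInv_step (cs : List Char) (d : PySem.Dict Char Int) (i : Nat)
    (c : Char) (hc : cs[i]? = some c) (hd : pvDictInv cs d i) :
    pvDictInv cs (d.insert c (i : Int)) (i + 1) := by
  intro c' hc'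
  by_cases hne : c' = c
  · subst hne
    rw [PySem.Dict.get?_insert_self]
    refine ⟨fun h => absurd h (by simp), fun x hx => ?_⟩
    have hx' : x = (i : Int) := (Option.some.inj hx).symm
    exact ⟨i, hx', by omega, hc, fun k hk1 hk2 _ => by omega⟩
  · rw [PySem.Dict.get?_insert_of_ne _ _ hne]
    refine ⟨fun h k hk1 hk2 hk3 => ?_, fun x hx => ?_⟩
    · rcases Nat.lt_or_ge k i with h' | h'
      · exact (hd c' hc').1 h k hk1 h' hk3
      · have : k = i := by omega
        rw [this, hc] at hk3
        exact hne (Option.some.inj hk3).symm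
    · obtain ⟨j, h1, h2, h3, h4⟩ := (hd c' hc').2 x hx
      refine ⟨j, h1, by omega, h3, fun k hk1 hk2 hk3 => ?_⟩
      rcases Nat.lt_or_ge k i with h' | h'
      · exact h4 k hk1 h' hk3
      · have : k = i := by omega
        rw [this, hc] at hk3
        exact hne (Option.some.inj hk3).symm

-- the while loop stops exactly one past the window's occurrence j of char,
-- leaving seen = the vowels of the shrunk window cs[j+1:i]
theorem pvShrink_spec (cs : List Char) (c : Char) (hcv : c ∈ pvVowels) (i j : Nat)
    (hj : j < i) (hin : i ≤ cs.length) (hocc : cs[j]? = some c)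
    (huniq : ∀ k, j < k → k < i → cs[k]? ≠ some c) :
    ∀ fuel L seen, L ≤ j → j + 1 ≤ L + fuel →
    pvSeenInv cs seen L i → pvDistinctWin cs L i →
    ∃ seen2, pvShrink cs c fuel seen (L : Int) = (seen2, ((j : Int) + 1)) ∧
      pvSeenInv cs seen2 (j + 1) i := by
  intro fuel
  induction fuel with
  | zero => intro L seen hLj hfuel _ _; omega
  | succ n ih =>
    intro L seen hLj hfuel hs hw
    have hLn : L < cs.length := by omega
    have hcin : c ∈ seen := (hs c).2 ⟨hcv, j, hLj, hj, hocc⟩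
    obtain ⟨cL, hcL⟩ : ∃ cL, cs[L]? = some cL := ⟨cs[L], by simp [hLn]⟩
    have hget : PySem.List.pyGet? cs (L : Int) = some cL := by
      rw [PySem.List.pyGet?_natCast]; exact hcL
    -- the state after processing cs[L] satisfies the window invariant at L+1
    have hs' : pvSeenInv cs
        (if PySem.Set.contains pvVowels cL then PySem.Set.discard seen cL else seen)
        (L + 1) i := by
      intro x
      by_cases hv : cL ∈ pvVowels
      · rw [if_pos (by simpa [PySem.Set.contains_iff] using hv)]
        rw [PySem.Set.mem_discard]
        constructor
        · rintro ⟨hx, hne⟩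
          obtain ⟨hxv, k, hk1, hk2, hk3⟩ := (hs x).1 hx
          refine ⟨hxv, k, ?_, hk2, hk3⟩
          rcases Nat.lt_or_ge L k with h' | h'
          · omega
          · exfalso
            have hkL : k = L := by omega
            rw [hkL, hcL] at hk3
            exact hne (Option.some.inj hk3).symm
        · rintro ⟨hxv, k, hk1, hk2, hk3⟩
          refine ⟨(hs x).2 ⟨hxv, k, by omega, hk2, hk3⟩, ?_⟩
          intro hxe
          exact hw cL L k hv (le_refl L) (by omega) hk2 hcL (by rw [← hxe]; exact hk3)
      · rw [if_neg (by simpa [PySem.Set.contains_iff] using hv)]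
        constructor
        · intro hx
          obtain ⟨hxv, k, hk1, hk2, hk3⟩ := (hs x).1 hx
          refine ⟨hxv, k, ?_, hk2, hk3⟩
          rcases Nat.lt_or_ge L k with h' | h'
          · omega
          · exfalso
            have hkL : k = L := by omega
            rw [hkL, hcL] at hk3
            exact hv ((Option.some.inj hk3) ▸ hxv)
        · rintro ⟨hxv, k, hk1, hk2, hk3⟩
          exact (hs x).2 ⟨hxv, k, by omega, hk2, hk3⟩
    have hw' : pvDistinctWin cs (L + 1) i := by
      intro v k1 k2 hv h1 h2 h3; exact hw v k1 k2 hv (by omega) h2 h3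
    simp only [pvShrink]
    rw [if_pos (by simpa [PySem.Set.contains_iff] using hcin), hget]
    dsimp only
    rcases Nat.lt_or_ge L j with hLlt | hLge
    · -- L < j : keep shrinking
      obtain ⟨seen2, hrec, hinv⟩ := ih (L + 1) _ (by omega) (by omega) hs' hw'
      refine ⟨seen2, ?_, hinv⟩
      rw [show ((L : Int) + 1) = ((L + 1 : Nat) : Int) by push_cast; ring]
      exact hrec
    · -- L = j : this step removes c and the loop exits
      have hLj' : L = j := by omega
      subst hLj'
      have hcc : cL = c := by
        rw [hocc] at hcL
        exact (Option.some.inj hcL).symm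
      rw [hcc] at hs'
      rw [hcc]
      have hnotin : c ∉ (if PySem.Set.contains pvVowels c then PySem.Set.discard seen c else seen) := by
        intro hmem
        obtain ⟨_, k, hk1, hk2, hk3⟩ := (hs' c).1 hmem
        exact huniq k (by omega) hk2 hk3
      rw [pvShrink_no _ _ _ _ _ hnotin]
      exact ⟨_, rfl, hs'⟩

theorem pvMain (cs : List Char) (t : Nat) :
    ∀ (i L : Nat) (d : PySem.Dict Char Int) (seen : PySem.Set Char) (m : Int),
    cs.length ≤ i + t → L ≤ i → i ≤ cs.length →
    pvDictInv cs d i → pvSeenInv cs seen L i → pvDistinctWin cs L i →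
    ((PySem.List.enumerate (cs.drop i) i).foldl pvAStep (d, (L : Int), m)).2.2
      = ((PySem.List.enumerate (cs.drop i) i).foldl (pvBStep cs) (seen, (L : Int), m)).2.2 := by
  induction t with
  | zero =>
    intro i L d seen m ht _ _ _ _ _
    rw [List.drop_of_length_le (by omega)]
    simp [PySem.List.enumerate]
  | succ n ih =>
    intro i L d seen m ht hLi hin hd hs hw
    rcases Nat.lt_or_ge i cs.length with hlt | hge
    · -- one loop iteration on char c = cs[i]
      set c := cs[i] with hc
      have hocc : cs[i]? = some c := by simp [hlt, hc]
      rw [List.drop_eq_getElem_cons hlt, PySem.List.enumerate_cons]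
      rw [← hc]
      simp only [List.foldl_cons]
      rw [show ((i : Int) + 1) = ((i + 1 : Nat) : Int) by push_cast; ring]
      by_cases hcv : c ∈ pvVowels
      · -- vowel
        have hcvb : PySem.Set.contains pvVowels c = true := by
          simpa [PySem.Set.contains_iff] using hcv
        simp only [pvAStep, pvBStep, hcvb, if_true]
        by_cases hcseen : c ∈ seen
        · -- repeated window vowel: A jumps to last_seen[c]+1, B shrinks there stepwise
          obtain ⟨_, j, hLj, hji, hjocc⟩ := (hs c).1 hcseen
          -- the dict's entry for c is exactly j
          obtain ⟨x, hg⟩ : ∃ x, d.get? c = some x := by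
            cases hgg : d.get? c with
            | none => exact absurd hjocc ((hd c hcv).1 hgg j (by omega) hji)
            | some y => exact ⟨y, rfl⟩
          obtain ⟨j', hxj', hj'i, hj'occ, hnol⟩ := (hd c hcv).2 x hg
          have hjj : j' = j := by
            rcases lt_trichotomy j' j with h' | h' | h'
            · exact absurd hjocc (hnol j (by omega) hji)
            · exact h'
            · exact absurd hj'occ (hw c j j' hcv hLj h' hj'i hjocc)
          subst hjj
          subst hxj'
          obtain ⟨seen2, hshr, hinv2⟩ :=
            pvShrink_spec cs c hcv i j' hji hin hjocc
              (fun k hk1 hk2 => hnol k (by omega) hk2)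
              cs.length L seen hLj (by omega) hs hw
          rw [hg, hshr]
          dsimp only
          rw [if_pos (by exact_mod_cast hLj)]
          rw [show ((j' : Int) + 1) = ((j' + 1 : Nat) : Int) by push_cast; ring]
          exact ih (i + 1) (j' + 1) _ _ _ (by omega) (by omega) (by omega)
            (pvDictInv_step cs d i c hocc hd)
            (pvSeenInv_step cs seen2 (j' + 1) i c (by omega) hocc hcv hinv2)
            (pvDistinctWin_step cs (j' + 1) i c hocc
              (fun v k1 k2 hv h1 h2 h3 => hw v k1 k2 hv (by omega) h2 h3)
              (fun k hk1 hk2 => hnol k hk1 hk2))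
        · -- fresh vowel: neither side moves left
          have hnowin : ∀ k, L ≤ k → k < i → cs[k]? ≠ some c := by
            intro k h1 h2 h3
            exact hcseen ((hs c).2 ⟨hcv, k, h1, h2, h3⟩)
          rw [pvShrink_no cs c cs.length seen (L : Int) hcseen]
          have hleft : (match d.get? c with
              | some j => if (L : Int) ≤ j then j + 1 else (L : Int)
              | none => (L : Int)) = (L : Int) := by
            cases hg : d.get? c with
            | none => rfl
            | some x =>
              obtain ⟨j, hxj, hji, hjocc, _⟩ := (hd c hcv).2 x hg
              subst hxj
              dsimp only
              rw [if_neg]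
              intro hLx
              exact hnowin j (by exact_mod_cast hLx) hji hjocc
          rw [hleft]
          dsimp only
          exact ih (i + 1) L _ _ _ (by omega) (by omega) (by omega)
            (pvDictInv_step cs d i c hocc hd)
            (pvSeenInv_step cs seen L i c hLi hocc hcv hs)
            (pvDistinctWin_step cs L i c hocc hw hnowin)
      · -- non-vowel: only max_len is updated on both sides
        have hcvb : PySem.Set.contains pvVowels c = false := by
          simp only [Bool.eq_false_iff, ne_eq, PySem.Set.contains_iff]
          exact hcv
        simp only [pvAStep, pvBStep, hcvb, Bool.false_eq_true, if_false]
        apply ih (i + 1) L d seen _ (by omega) (by omega) (by omega)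
        · intro c' hc'
          refine ⟨fun hn k hk1 hk2 hk3 => ?_, fun x hx => ?_⟩
          · rcases Nat.lt_or_ge k i with h' | h'
            · exact (hd c' hc').1 hn k hk1 h' hk3
            · have : k = i := by omega
              rw [this, hocc] at hk3
              exact hcv ((Option.some.inj hk3) ▸ hc')
          · obtain ⟨j, h1, h2, h3, h4⟩ := (hd c' hc').2 x hx
            refine ⟨j, h1, by omega, h3, fun k hk1 hk2 hk3 => ?_⟩
            rcases Nat.lt_or_ge k i with h' | h'
            · exact h4 k hk1 h' hk3
            · have : k = i := by omega
              rw [this, hocc] at hk3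
              exact hcv ((Option.some.inj hk3) ▸ hc')
        · intro x
          rw [hs x]
          constructor
          · rintro ⟨hxv, k, h1, h2, h3⟩; exact ⟨hxv, k, h1, by omega, h3⟩
          · rintro ⟨hxv, k, h1, h2, h3⟩
            refine ⟨hxv, k, h1, ?_, h3⟩
            rcases Nat.lt_or_ge k i with h' | h'
            · exact h'
            · exfalso
              have : k = i := by omega
              rw [this, hocc] at h3
              exact hcv ((Option.some.inj h3) ▸ hxv)
        · intro v k1 k2 hv h1 h2 h3 h4
          rcases Nat.lt_or_ge k2 i with h' | h'
          · exact hw v k1 k2 hv h1 h2 h' h4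
          · have : k2 = i := by omega
            rw [this, hocc]
            intro h5
            exact hcv ((Option.some.inj h5) ▸ hv)
    · rw [List.drop_of_length_le (by omega)]
      simp [PySem.List.enumerate]

-- ===== VERDICT (by name: the statement is the Claim_ definition above) =====
theorem longest_substring_no_repeating_vowels_spec : Claim_equal_longest_substring_no_repeating_vowels := by
  intro s _
  unfold Spec_longest_substring_no_repeating_vowels
  unfold longest_substring_no_repeating_vowels longest_substring_no_repeating_vowels_alt
  have h := pvMain s.toList s.toList.length 0 0 PySem.Dict.empty PySem.Set.empty 0
    (by omega) (by omega) (by omega)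
    (by intro c _
        constructor
        · intro _ k _ hk _; omega
        · intro x hx
          rw [PySem.Dict.get?_empty] at hx
          exact absurd hx (by simp))
    (by intro x
        constructor
        · intro h; exact absurd h (List.not_mem_nil)
        · rintro ⟨_, k, _, hk2, _⟩; omega)
    (by intro v k1 k2 _ _ _ h3 _; omega)
  simpa using h
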